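-- pv_equiv track=rewrite | github.com/MarcelloMalpighi/SomTD | src/SomTD_ReadGTP.py | locateSoftClipped
-- ===== SOURCE A (Python) =====
-- def locateSoftClipped(cigartuples):
--     """
--     function for generating the location of the longest soft-clipped part
--     """
--     location_list=[]
--     length_list=[]
--     start_base=0
--     end_base=-1
--     for i in cigartuples:
--         if i[0] in [2,3,5,6]:
--             continue
--         start_base = end_base + 1 # closed interval
--         end_base = end_base + i[1] # closed interval
--         if i[0] == 4:
--             location_list.append([start_base,end_base])
--             length_list.append(end_base - start_base + 1)
--     max_value = max(length_list)
--     return location_list[length_list.index(max_value)]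
-- ===== SOURCE B (Python) =====
-- def locateSoftClipped(cigartuples):
--     """
--     single pass with a running maximum: keep a base cursor and the best
--     (longest, first on ties) soft-clipped interval seen so far
--     """
--     best_len = None
--     best_loc = None
--     pos = 0
--     for op, length in cigartuples:
--         if op in (2, 3, 5, 6):
--             continue
--         if op == 4 and (best_len is None or length > best_len):
--             best_len = length
--             best_loc = [pos, pos + length - 1]
--         pos += length
--     if best_loc is None:
--         raise ValueError("no soft-clipped segment in CIGAR")
--     return best_loc
-- ===== Notes on version B (the rewrite author's own statement) =====
-- stated objective: simpler
-- what changed: Replaces A's two parallel accumulator lists plus the final max()/index() rescan by a single running-maximum (best length, best interval) updated in the same pass over the CIGAR tuples.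
import Mathlib
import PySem

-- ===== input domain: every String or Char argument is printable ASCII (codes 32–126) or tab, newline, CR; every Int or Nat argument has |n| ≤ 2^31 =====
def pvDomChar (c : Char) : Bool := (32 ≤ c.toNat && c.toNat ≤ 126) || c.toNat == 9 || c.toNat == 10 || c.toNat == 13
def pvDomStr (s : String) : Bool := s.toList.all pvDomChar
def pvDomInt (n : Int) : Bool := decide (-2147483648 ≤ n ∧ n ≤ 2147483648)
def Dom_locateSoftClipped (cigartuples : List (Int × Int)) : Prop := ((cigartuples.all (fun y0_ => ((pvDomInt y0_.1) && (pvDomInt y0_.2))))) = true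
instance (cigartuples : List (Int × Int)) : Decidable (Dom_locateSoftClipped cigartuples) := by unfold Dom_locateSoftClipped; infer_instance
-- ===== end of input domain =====

-- B replaces A's two parallel lists + final max()/index() rescan by a running maximum kept in the same pass (objective: simpler).

-- ===== PORT A =====
-- loop body of A: state = (location_list, length_list, start_base, end_base)
def lscStepA (s : List (List Int) × List Int × Int × Int) (i : Int × Int) :
    List (List Int) × List Int × Int × Int :=
  let (locs, lens, _sb, eb) := s
  if ([2, 3, 5, 6] : List Int).contains i.1 then s
  else
    let sb' := eb + 1
    let eb' := eb + i.2
    if i.1 == 4 then (locs ++ [[sb', eb']], lens ++ [eb' - sb' + 1], sb', eb')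
    else (locs, lens, sb', eb')

-- A's tail: max(length_list) then location_list[length_list.index(max_value)]
def lscFinishA (st : List (List Int) × List Int × Int × Int) : List Int :=
  match PySem.List.max? st.2.1 (fun x => x) with
  | none => []          -- max([]) raises ValueError; excluded by Pre_
  | some m =>
    match PySem.List.index? st.2.1 m with
    | none => []        -- unreachable: the max is a member
    | some k => st.1.getD k []

def locateSoftClipped (cigartuples : List (Int × Int)) : List Int :=
  lscFinishA (cigartuples.foldl lscStepA ([], [], 0, -1))

-- ===== PORT B =====
-- loop body of B: state = (best = (best_len, best_loc) or none, pos)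
def lscStepB (s : Option (Int × List Int) × Int) (i : Int × Int) :
    Option (Int × List Int) × Int :=
  let (best, pos) := s
  if ([2, 3, 5, 6] : List Int).contains i.1 then s
  else
    let best' :=
      if i.1 == 4 && (match best with | none => true | some (bl, _) => decide (bl < i.2)) then
        some (i.2, [pos, pos + i.2 - 1])
      else best
    (best', pos + i.2)

def locateSoftClipped_alt (cigartuples : List (Int × Int)) : List Int :=
  match (cigartuples.foldl lscStepB (none, 0)).1 with
  | none => []          -- B raises ValueError here; excluded by Pre_
  | some (_, loc) => loc

-- ===== PRECONDITION & SPEC =====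
-- A raises ValueError (max of an empty list) exactly when no CIGAR op equals 4; B raises there too.
def Pre_locateSoftClipped (cigartuples : List (Int × Int)) : Prop :=
  ∃ i ∈ cigartuples, i.1 = 4
instance (cigartuples : List (Int × Int)) : Decidable (Pre_locateSoftClipped cigartuples) := by
  unfold Pre_locateSoftClipped; infer_instance

def pvWitness_locateSoftClipped : (List (Int × Int)) := ([(0, 3), (4, 5), (2, 1)])

def Spec_locateSoftClipped (cigartuples : List (Int × Int)) (out : List Int) : Prop := out = locateSoftClipped_alt cigartuples
instance (cigartuples : List (Int × Int)) (out : List Int) : Decidable (Spec_locateSoftClipped cigartuples out) := by unfold Spec_locateSoftClipped; infer_instance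

-- ===== CLAIM (what is proved, stated in full; the proofs are below) =====
def Claim_equal_locateSoftClipped : Prop := ∀ (cigartuples : List (Int × Int)), Dom_locateSoftClipped cigartuples → Pre_locateSoftClipped cigartuples → Spec_locateSoftClipped cigartuples (locateSoftClipped cigartuples)

-- ===== LEMMAS AND PROOFS =====

-- invariant tying A's loop state to B's
def lscInv (locs : List (List Int)) (lens : List Int) (eb : Int)
    (best : Option (Int × List Int)) (pos : Int) : Prop :=
  pos = eb + 1 ∧ locs.length = lens.length ∧
  (match best with
   | none => lens = []
   | some (m, loc) =>
     ∃ k, PySem.List.max? lens (fun x => x) = some m ∧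
       PySem.List.index? lens m = some k ∧ k < locs.length ∧ locs.getD k [] = loc)

lemma lsc_max?_append_one {lens : List Int} {m : Int} (y : Int)
    (h : PySem.List.max? lens (fun z => z) = some m) :
    PySem.List.max? (lens ++ [y]) (fun z => z) = some (max m y) := by
  cases lens with
  | nil => simp [PySem.List.max?] at h
  | cons x t =>
    rw [PySem.List.max?_id_cons] at h
    rw [List.cons_append, PySem.List.max?_id_cons, List.foldl_append]
    simp_all

lemma lsc_getD_append_left {l : List (List Int)} {x : List Int} {k : Nat}
    (h : k < l.length) : (l ++ [x]).getD k [] = l.getD k [] := by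
  simp [List.getD_eq_getElem?_getD, List.getElem?_append_left h]

lemma lsc_getD_append_last (l : List (List Int)) (x : List Int) :
    (l ++ [x]).getD l.length [] = x := by
  simp [List.getD_eq_getElem?_getD]

lemma lsc_main : ∀ (l : List (Int × Int)) (locs : List (List Int)) (lens : List Int)
    (sb eb : Int) (best : Option (Int × List Int)) (pos : Int),
    lscInv locs lens eb best pos →
    lscFinishA (l.foldl lscStepA (locs, lens, sb, eb)) =
      (match (l.foldl lscStepB (best, pos)).1 with
       | none => []
       | some (_, loc) => loc) := by
  intro l
  induction l with
  | nil =>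
    intro locs lens sb eb best pos hinv
    obtain ⟨hpos, hlen, hbest⟩ := hinv
    simp only [List.foldl_nil]
    cases best with
    | none =>
      have hnil : lens = [] := hbest
      subst hnil
      simp [lscFinishA, PySem.List.max?]
    | some p =>
      obtain ⟨m, loc⟩ := p
      obtain ⟨k, hmax, hidx, hk, hget⟩ := hbest
      simp only [lscFinishA, hmax, hidx]
      exact hget
  | cons i t ih =>
    intro locs lens sb eb best pos hinv
    obtain ⟨op, ln⟩ := i
    obtain ⟨hpos, hlen, hbest⟩ := hinv
    simp only [List.foldl_cons]
    by_cases hskip : ([2, 3, 5, 6] : List Int).contains op = true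
    · rw [show lscStepA (locs, lens, sb, eb) (op, ln) = (locs, lens, sb, eb) from by
          simp only [lscStepA]; rw [if_pos hskip],
        show lscStepB (best, pos) (op, ln) = (best, pos) from by
          simp only [lscStepB]; rw [if_pos hskip]]
      exact ih _ _ _ _ _ _ ⟨hpos, hlen, hbest⟩
    · by_cases h4 : op = 4
      · -- soft clip: A appends to both lists, B updates the running best
        have hstepA : lscStepA (locs, lens, sb, eb) (op, ln) =
            (locs ++ [[eb + 1, eb + ln]], lens ++ [ln], eb + 1, eb + ln) := by
          simp only [lscStepA]
          rw [if_neg hskip, if_pos (by simp [h4]),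
            show eb + ln - (eb + 1) + 1 = ln from by ring]
        cases best with
        | none =>
          have hnil : lens = [] := hbest
          have hlocs : locs = [] := by
            subst hnil; exact List.eq_nil_of_length_eq_zero hlen
          have hstepB : lscStepB (none, pos) (op, ln) =
              (some (ln, [pos, pos + ln - 1]), pos + ln) := by
            simp only [lscStepB]; rw [if_neg hskip, if_pos (by simp [h4])]
          rw [hstepA, hstepB]
          refine ih _ _ _ _ _ _ ⟨by omega, by simp [hnil, hlocs], ?_⟩
          refine ⟨0, ?_, ?_, ?_, ?_⟩
          · simp [hnil, PySem.List.max?_id_cons]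
          · simp only [hnil, List.nil_append]
            exact PySem.List.index?_cons_self ln []
          · simp [hlocs]
          · simp only [hlocs, List.nil_append]
            show [eb + 1, eb + ln] = [pos, pos + ln - 1]
            simp only [List.cons.injEq, and_true]
            constructor <;> omega
        | some p =>
          obtain ⟨m, loc⟩ := p
          obtain ⟨k, hmax, hidx, hk, hget⟩ := hbest
          by_cases hgt : m < ln
          · have hstepB : lscStepB (some (m, loc), pos) (op, ln) =
                (some (ln, [pos, pos + ln - 1]), pos + ln) := by
              simp only [lscStepB]; rw [if_neg hskip, if_pos (by simp [h4, hgt])]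
            rw [hstepA, hstepB]
            refine ih _ _ _ _ _ _ ⟨by omega, by simp [hlen], ?_⟩
            have hnotmem : ln ∉ lens := fun hmem =>
              absurd (PySem.List.max?_isMax hmax ln hmem) (by omega)
            refine ⟨lens.length, ?_, ?_, ?_, ?_⟩
            · rw [lsc_max?_append_one ln hmax, max_eq_right (le_of_lt hgt)]
            · exact PySem.List.index?_append_singleton_self lens ln hnotmem
            · simp [hlen]
            · rw [← hlen, lsc_getD_append_last]
              simp only [List.cons.injEq, and_true]
              constructor <;> omega
          · have hstepB : lscStepB (some (m, loc), pos) (op, ln) =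
                (some (m, loc), pos + ln) := by
              simp only [lscStepB]; rw [if_neg hskip, if_neg (by simp [h4, hgt])]
            rw [hstepA, hstepB]
            refine ih _ _ _ _ _ _ ⟨by omega, by simp [hlen], ?_⟩
            refine ⟨k, ?_, ?_, ?_, ?_⟩
            · rw [lsc_max?_append_one ln hmax, max_eq_left (by omega)]
            · rw [PySem.List.index?_append_of_mem [ln] (PySem.List.max?_mem hmax)]
              exact hidx
            · simp only [List.length_append]; omega
            · rw [lsc_getD_append_left hk]; exact hget
      · -- other consuming op: cursors advance, best unchanged
        rw [show lscStepA (locs, lens, sb, eb) (op, ln) = (locs, lens, eb + 1, eb + ln) from by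
            simp only [lscStepA]; rw [if_neg hskip, if_neg (by simp [h4])],
          show lscStepB (best, pos) (op, ln) = (best, pos + ln) from by
            simp only [lscStepB]; rw [if_neg hskip, if_neg (by simp [h4])]]
        exact ih _ _ _ _ _ _ ⟨by omega, hlen, hbest⟩

-- ===== VERDICT (by name: the statement is the Claim_ definition above) =====
theorem locateSoftClipped_spec : Claim_equal_locateSoftClipped := by
  intro ct _ _
  unfold Spec_locateSoftClipped locateSoftClipped locateSoftClipped_alt
  exact lsc_main ct [] [] 0 (-1) none 0 ⟨by norm_num, rfl, rfl⟩
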